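-- pv_equiv track=rewrite | github.com/Mince64/Popfile-Modifier | misc.py | findValidTags
-- ===== SOURCE A (Python) =====
-- def findValidTags(line, tag):
--     if len(line) < len(tag):
--         return []
--
--     in_string  = False
--     indexes    = []
--
--     tag_index = 0
--     for index, char in enumerate(line):
--         # Check char for comment
--         if char == '/' and not in_string:
--             if tag != "//":
--                 if index != len(line) - 1:
--                     if line[index + 1] == '/':
--                         break # In comment, no need to check the rest of the line
--
--         # Check char for string
--         elif char == '"':
--             in_string = True if not in_string else False
--             continue
--
--         # Check char for tag
--         if not in_string:
--             if char == tag[tag_index]: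
--                 if tag_index == len(tag) - 1:
--                     indexes.append(index - tag_index)
--                     tag_index = 0
--                 else:
--                     tag_index += 1
--
--     return indexes
-- ===== SOURCE B (Python) =====
-- def findValidTags(line, tag):
--     if len(line) < len(tag):
--         return []
--     # pass 1: collect candidate characters (with positions): chars outside
--     # string literals, quote chars skipped, cut off at a '//' comment.
--     cands = []
--     in_string = False
--     for i, ch in enumerate(line):
--         if ch == '"':
--             in_string = not in_string
--         elif in_string:
--             continue
--         elif ch == '/' and tag != "//" and i + 1 < len(line) and line[i + 1] == '/':
--             break
--         else:
--             cands.append((ch, i))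
--     # pass 2: greedy (non-backtracking) subsequence match of tag over cands.
--     out = []
--     k = 0
--     for ch, i in cands:
--         if ch == tag[k]:
--             k += 1
--             if k == len(tag):
--                 out.append(i - len(tag) + 1)
--                 k = 0
--     return out
-- ===== Notes on version B (the rewrite author's own statement) =====
-- stated objective: alternative
-- what changed: Replaces A's single fused loop (comment/string/tag logic interleaved with the matcher state) by two passes: pass 1 filters the line into a list of (char, index) candidates outside strings/comments, pass 2 runs the greedy subsequence matcher over that list.
-- outside the precondition, e.g. on findValidTags('', ''): A returns [], B returns []
import Mathlib
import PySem

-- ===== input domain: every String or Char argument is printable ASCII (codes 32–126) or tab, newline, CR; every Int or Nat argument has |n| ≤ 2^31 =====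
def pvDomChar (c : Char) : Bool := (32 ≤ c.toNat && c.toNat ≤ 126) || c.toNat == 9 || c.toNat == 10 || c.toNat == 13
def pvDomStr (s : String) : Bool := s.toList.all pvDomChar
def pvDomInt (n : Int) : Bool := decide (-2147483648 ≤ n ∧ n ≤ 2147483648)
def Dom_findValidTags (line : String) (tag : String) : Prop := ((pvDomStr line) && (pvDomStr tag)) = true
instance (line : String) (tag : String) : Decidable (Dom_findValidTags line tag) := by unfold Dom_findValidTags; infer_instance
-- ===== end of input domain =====

-- B splits A's fused loop into a filter pass (candidates outside strings/comments)
-- followed by a greedy subsequence-matcher pass; same cost, different decomposition.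

-- ===== PORT A =====
-- A's single loop over enumerate(line); state: in_string, tag_index, indexes; 'break' returns indexes.
def pvA_loop (L : Int) (line tag : List Char) :
    List (Int × Char) → Bool → Nat → List Int → List Int
  | [], _, _, idxs => idxs
  | (i, ch) :: r, instr, ti, idxs =>
    if ch = '/' ∧ instr = false then
      if tag ≠ ['/', '/'] ∧ i ≠ L - 1 ∧ PySem.List.pyGetD line (i + 1) ' ' = '/' then
        idxs  -- break
      else if ch = PySem.List.pyGetD tag (ti : Int) ' ' then
        if ti = tag.length - 1 then pvA_loop L line tag r instr 0 (idxs ++ [i - (ti : Int)])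
        else pvA_loop L line tag r instr (ti + 1) idxs
      else pvA_loop L line tag r instr ti idxs
    else if ch = '"' then pvA_loop L line tag r (!instr) ti idxs
    else if instr then pvA_loop L line tag r instr ti idxs
    else if ch = PySem.List.pyGetD tag (ti : Int) ' ' then
      if ti = tag.length - 1 then pvA_loop L line tag r instr 0 (idxs ++ [i - (ti : Int)])
      else pvA_loop L line tag r instr (ti + 1) idxs
    else pvA_loop L line tag r instr ti idxs

def findValidTags (line : String) (tag : String) : List Int :=
  let lc := line.toList
  let tc := tag.toList
  if lc.length < tc.length then []
  else pvA_loop (lc.length : Int) lc tc (PySem.List.enumerate lc 0) false 0 []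

-- ===== PORT B =====
-- pass 1: candidate (char, index) pairs outside strings, cut at a '//' comment
def pvB_cands (L : Int) (line tag : List Char) :
    List (Int × Char) → Bool → List (Char × Int) → List (Char × Int)
  | [], _, acc => acc
  | (i, ch) :: r, instr, acc =>
    if ch = '"' then pvB_cands L line tag r (!instr) acc
    else if instr then pvB_cands L line tag r instr acc
    else if ch = '/' ∧ tag ≠ ['/', '/'] ∧ i + 1 < L ∧ PySem.List.pyGetD line (i + 1) ' ' = '/' then
      acc  -- break
    else pvB_cands L line tag r instr (acc ++ [(ch, i)])

-- pass 2: greedy subsequence matcher over the candidates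
def pvB_match (tag : List Char) : List (Char × Int) → Nat → List Int → List Int
  | [], _, out => out
  | (ch, i) :: r, k, out =>
    if ch = PySem.List.pyGetD tag (k : Int) ' ' then
      if k + 1 = tag.length then pvB_match tag r 0 (out ++ [i - (tag.length : Int) + 1])
      else pvB_match tag r (k + 1) out
    else pvB_match tag r k out

def findValidTags_alt (line : String) (tag : String) : List Int :=
  let lc := line.toList
  let tc := tag.toList
  if lc.length < tc.length then []
  else pvB_match tc (pvB_cands (lc.length : Int) lc tc (PySem.List.enumerate lc 0) false []) 0 []

-- ===== PRECONDITION & SPEC =====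
-- Pre_ excludes the empty tag: there A evaluates tag[0] and raises IndexError as soon as the
-- line has a character reaching the tag check (and returns [] only on degenerate lines).
def Pre_findValidTags (line : String) (tag : String) : Prop := tag ≠ ""
instance (line : String) (tag : String) : Decidable (Pre_findValidTags line tag) := by
  unfold Pre_findValidTags; infer_instance

def pvWitness_findValidTags : String × String := ("ab // \"c\"", "b")

def Spec_findValidTags (line : String) (tag : String) (out : List Int) : Prop := out = findValidTags_alt line tag
instance (line : String) (tag : String) (out : List Int) : Decidable (Spec_findValidTags line tag out) := by unfold Spec_findValidTags; infer_instance

-- ===== CLAIM (what is proved, stated in full; the proofs are below) =====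
def Claim_equal_findValidTags : Prop := ∀ (line : String) (tag : String), Dom_findValidTags line tag → Pre_findValidTags line tag → Spec_findValidTags line tag (findValidTags line tag)

-- ===== LEMMAS AND PROOFS =====

-- pass-1 accumulator lemma
theorem pvB_cands_acc (L : Int) (line tag : List Char) (rest : List (Int × Char)) :
    ∀ (instr : Bool) (acc : List (Char × Int)),
    pvB_cands L line tag rest instr acc = acc ++ pvB_cands L line tag rest instr [] := by
  induction rest with
  | nil => intro instr acc; simp [pvB_cands]
  | cons p r ih =>
    intro instr acc
    obtain ⟨i, ch⟩ := p
    simp only [pvB_cands]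
    split_ifs with h1 h2 h3
    · exact ih _ _
    · exact ih _ _
    · simp
    · rw [ih _ (acc ++ [(ch, i)]), ih _ ([] ++ [(ch, i)])]
      simp

-- main loop correspondence: A's fused loop = matcher over pass-1 candidates
theorem pvMain (L : Int) (line tag : List Char) (htag : tag ≠ [])
    (rest : List (Int × Char)) :
    ∀ (instr : Bool) (ti : Nat) (idxs : List Int),
    (∀ p ∈ rest, 0 ≤ p.1 ∧ p.1 < L) → ti < tag.length →
    pvA_loop L line tag rest instr ti idxs
      = pvB_match tag (pvB_cands L line tag rest instr []) ti idxs := by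
  induction rest with
  | nil => intro instr ti idxs _ _; simp [pvA_loop, pvB_cands, pvB_match]
  | cons p r ih =>
    intro instr ti idxs hmem hti
    obtain ⟨i, ch⟩ := p
    have hbound : 0 ≤ i ∧ i < L := hmem (i, ch) (by simp)
    have hmem' : ∀ p ∈ r, 0 ≤ p.1 ∧ p.1 < L := fun p hp => hmem p (by simp [hp])
    have hlen1 : 1 ≤ tag.length := by
      cases tag with
      | nil => exact absurd rfl htag
      | cons a t => simp
    have hbrk : (i ≠ L - 1) ↔ (i + 1 < L) := by omega
    by_cases hq : ch = '"'
    · -- quote: A toggles & continues; B skips the char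
      have hns : ¬ (ch = '/' ∧ instr = false) := by simp [hq]
      simp only [pvA_loop, pvB_cands]
      rw [if_neg hns, if_pos hq, if_pos hq]
      exact ih _ _ _ hmem' hti
    · by_cases hin : instr = true
      · -- inside a string (ch ≠ '"'): both skip
        have hns : ¬ (ch = '/' ∧ instr = false) := by simp [hin]
        simp only [pvA_loop, pvB_cands]
        rw [if_neg hns, if_neg hq, if_pos hin, if_neg hq, if_pos hin]
        exact ih _ _ _ hmem' hti
      · -- outside a string, ch ≠ '"'
        have hin0 : instr = false := by simpa using hin
        by_cases hsl : ch = '/'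
        · by_cases hcm : tag ≠ ['/', '/'] ∧ i ≠ L - 1 ∧ PySem.List.pyGetD line (i + 1) ' ' = '/'
          · -- comment break: both stop
            have hcm' : ch = '/' ∧ tag ≠ ['/', '/'] ∧ i + 1 < L ∧
                PySem.List.pyGetD line (i + 1) ' ' = '/' :=
              ⟨hsl, hcm.1, hbrk.mp hcm.2.1, hcm.2.2⟩
            simp only [pvA_loop, pvB_cands]
            rw [if_pos ⟨hsl, hin0⟩, if_pos hcm, if_neg hq, if_neg hin, if_pos hcm']
            simp [pvB_match]
          · -- '/' that is not a comment start: ordinary candidate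
            have hcm' : ¬ (ch = '/' ∧ tag ≠ ['/', '/'] ∧ i + 1 < L ∧
                PySem.List.pyGetD line (i + 1) ' ' = '/') := by
              intro h; exact hcm ⟨h.2.1, hbrk.mpr h.2.2.1, h.2.2.2⟩
            simp only [pvA_loop, pvB_cands]
            rw [if_pos ⟨hsl, hin0⟩, if_neg hcm, if_neg hq, if_neg hin, if_neg hcm']
            simp only [List.nil_append]
            rw [pvB_cands_acc]
            simp only [List.singleton_append, pvB_match]
            by_cases hmt : ch = PySem.List.pyGetD tag (ti : Int) ' '
            · rw [if_pos hmt, if_pos hmt]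
              by_cases hfin : ti = tag.length - 1
              · have hfin' : ti + 1 = tag.length := by omega
                have hval : i - (ti : Int) = i - (tag.length : Int) + 1 := by
                  have : (ti : Int) = (tag.length : Int) - 1 := by omega
                  omega
                rw [if_pos hfin, if_pos hfin', hval]
                exact ih _ _ _ hmem' (by omega)
              · have hfin' : ¬ (ti + 1 = tag.length) := by omega
                rw [if_neg hfin, if_neg hfin']
                exact ih _ _ _ hmem' (by omega)
            · rw [if_neg hmt, if_neg hmt]
              exact ih _ _ _ hmem' hti
        · -- ordinary character: candidate
          have hns : ¬ (ch = '/' ∧ instr = false) := by simp [hsl]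
          have hcm' : ¬ (ch = '/' ∧ tag ≠ ['/', '/'] ∧ i + 1 < L ∧
              PySem.List.pyGetD line (i + 1) ' ' = '/') := by
            intro h; exact hsl h.1
          simp only [pvA_loop, pvB_cands]
          rw [if_neg hns, if_neg hq, if_neg hin, if_neg hq, if_neg hin, if_neg hcm']
          simp only [List.nil_append]
          rw [pvB_cands_acc]
          simp only [List.singleton_append, pvB_match]
          by_cases hmt : ch = PySem.List.pyGetD tag (ti : Int) ' '
          · rw [if_pos hmt, if_pos hmt]
            by_cases hfin : ti = tag.length - 1
            · have hfin' : ti + 1 = tag.length := by omega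
              have hval : i - (ti : Int) = i - (tag.length : Int) + 1 := by
                have : (ti : Int) = (tag.length : Int) - 1 := by omega
                omega
              rw [if_pos hfin, if_pos hfin', hval]
              exact ih _ _ _ hmem' (by omega)
            · have hfin' : ¬ (ti + 1 = tag.length) := by omega
              rw [if_neg hfin, if_neg hfin']
              exact ih _ _ _ hmem' (by omega)
          · rw [if_neg hmt, if_neg hmt]
            exact ih _ _ _ hmem' hti

-- ===== VERDICT (by name: the statement is the Claim_ definition above) =====
theorem findValidTags_spec : Claim_equal_findValidTags := by
  intro line tag _ hpre
  unfold Spec_findValidTags findValidTags findValidTags_alt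
  by_cases hg : line.toList.length < tag.toList.length
  · simp only [if_pos hg]
  · simp only [if_neg hg]
    have htag : tag.toList ≠ [] := by
      intro h
      apply hpre
      have h2 : tag.toList = "".toList := by simpa using h
      exact String.toList_inj.mp h2
    apply pvMain _ _ _ htag
    · intro p hp
      rcases (PySem.List.mem_enumerate_iff _ _ _).mp hp with ⟨k, hk, rfl⟩
      refine ⟨by simp, ?_⟩
      simp only [zero_add]
      exact_mod_cast hk
    · cases h : tag.toList with
      | nil => exact absurd h htag
      | cons a t => simp
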